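-- pv_equiv track=rewrite | github.com/lruggieri/spendsense | application/services/pattern_service.py | generate_human_description
-- ===== SOURCE A (Python) =====
-- from typing import List, Dict, Tuple, Optional
--
-- def generate_human_description(rules: List[dict]) -> str:
--     """
--     Generate human-readable description from rules.
--
--     Args:
--         rules: List of rule dicts with 'operator' and 'keyword'
--
--     Returns:
--         Human-readable string like "Starts with amazon, contains grocery OR vegetables, must NOT contain gift"
--     """
--     if not rules:
--         return "No rules defined"
--
--     parts = []
--
--     not_start = [r['keyword'] for r in rules if r['operator'] == 'NOT_START_WITH']
--     start = [r['keyword'] for r in rules if r['operator'] == 'START_WITH']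
--     or_kw = [r['keyword'] for r in rules if r['operator'] == 'OR']
--     and_kw = [r['keyword'] for r in rules if r['operator'] == 'AND']
--     not_kw = [r['keyword'] for r in rules if r['operator'] == 'NOT']
--     end = [r['keyword'] for r in rules if r['operator'] == 'END_WITH']
--
--     if not_start:
--         parts.append(f"Not starts with {' or '.join(not_start)}")
--
--     if start:
--         parts.append(f"Starts with {' or '.join(start)}")
--
--     if or_kw:
--         parts.append(f"Contains {' OR '.join(or_kw)}")
--
--     if and_kw:
--         parts.append(f"Must contain {' AND '.join(and_kw)}")
--
--     if not_kw:
--         parts.append(f"Must NOT contain {' or '.join(not_kw)}")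
--
--     if end:
--         parts.append(f"Ends with {' or '.join(end)}")
--
--     return ", ".join(parts)
-- ===== SOURCE B (Python) =====
-- _TABLE = [
--     ('NOT_START_WITH', 'Not starts with', ' or '),
--     ('START_WITH', 'Starts with', ' or '),
--     ('OR', 'Contains', ' OR '),
--     ('AND', 'Must contain', ' AND '),
--     ('NOT', 'Must NOT contain', ' or '),
--     ('END_WITH', 'Ends with', ' or '),
-- ]
-- _OPS = [t[0] for t in _TABLE]
--
-- def generate_human_description(rules):
--     """One pass over rules bucketing keywords by operator, then a data-driven table loop."""
--     if not rules:
--         return "No rules defined"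
--
--     buckets = {}
--     for r in rules:
--         op = r['operator']
--         if op in _OPS:
--             buckets.setdefault(op, []).append(r['keyword'])
--
--     parts = []
--     for op, prefix, sep in _TABLE:
--         kws = buckets.get(op, [])
--         if kws:
--             parts.append(f"{prefix} {sep.join(kws)}")
--
--     return ", ".join(parts)
-- ===== Notes on version B (the rewrite author's own statement) =====
-- stated objective: simpler
-- what changed: Replaces six separate filtering passes over rules and six hand-written if-blocks with a single bucketing pass into a dict keyed by operator plus a data-driven loop over an (operator, prefix, separator) table.
import Mathlib
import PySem

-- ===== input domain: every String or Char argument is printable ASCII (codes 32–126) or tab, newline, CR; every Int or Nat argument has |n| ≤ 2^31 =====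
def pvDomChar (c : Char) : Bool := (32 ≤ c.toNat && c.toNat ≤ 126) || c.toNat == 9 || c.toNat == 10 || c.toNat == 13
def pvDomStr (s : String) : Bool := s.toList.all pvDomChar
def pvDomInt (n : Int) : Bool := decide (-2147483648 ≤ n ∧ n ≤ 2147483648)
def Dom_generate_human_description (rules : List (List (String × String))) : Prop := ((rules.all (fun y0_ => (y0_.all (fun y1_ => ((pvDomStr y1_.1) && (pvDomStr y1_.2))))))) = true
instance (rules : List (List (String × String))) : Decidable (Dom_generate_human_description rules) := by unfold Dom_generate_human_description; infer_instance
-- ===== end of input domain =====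

-- B replaces A's six filtering passes and six if-blocks by one bucketing pass plus a table loop (simpler; return value only).

-- shared helper: r['k'] for the dict r (first-match association-list lookup).
-- Pre_ guarantees the key is present, so the "" default is never reached inside Pre_.
def pvKey (r : List (String × String)) (k : String) : String :=
  ((PySem.Dict.mk r).get? k).getD ""

-- ===== PORT A =====
def generate_human_description (rules : List (List (String × String))) : String :=
  if rules = [] then "No rules defined" else
  let not_start := (rules.filter (fun r => pvKey r "operator" == "NOT_START_WITH")).map (fun r => pvKey r "keyword")
  let start := (rules.filter (fun r => pvKey r "operator" == "START_WITH")).map (fun r => pvKey r "keyword")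
  let or_kw := (rules.filter (fun r => pvKey r "operator" == "OR")).map (fun r => pvKey r "keyword")
  let and_kw := (rules.filter (fun r => pvKey r "operator" == "AND")).map (fun r => pvKey r "keyword")
  let not_kw := (rules.filter (fun r => pvKey r "operator" == "NOT")).map (fun r => pvKey r "keyword")
  let end_ := (rules.filter (fun r => pvKey r "operator" == "END_WITH")).map (fun r => pvKey r "keyword")
  let parts : List String := []
  let parts := if not_start ≠ [] then parts ++ [PySem.Str.join "" ["Not starts with", " ", PySem.Str.join " or " not_start]] else parts
  let parts := if start ≠ [] then parts ++ [PySem.Str.join "" ["Starts with", " ", PySem.Str.join " or " start]] else parts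
  let parts := if or_kw ≠ [] then parts ++ [PySem.Str.join "" ["Contains", " ", PySem.Str.join " OR " or_kw]] else parts
  let parts := if and_kw ≠ [] then parts ++ [PySem.Str.join "" ["Must contain", " ", PySem.Str.join " AND " and_kw]] else parts
  let parts := if not_kw ≠ [] then parts ++ [PySem.Str.join "" ["Must NOT contain", " ", PySem.Str.join " or " not_kw]] else parts
  let parts := if end_ ≠ [] then parts ++ [PySem.Str.join "" ["Ends with", " ", PySem.Str.join " or " end_]] else parts
  PySem.Str.join ", " parts

-- ===== PORT B =====
def ghdTable : List (String × String × String) :=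
  [("NOT_START_WITH", "Not starts with", " or "),
   ("START_WITH", "Starts with", " or "),
   ("OR", "Contains", " OR "),
   ("AND", "Must contain", " AND "),
   ("NOT", "Must NOT contain", " or "),
   ("END_WITH", "Ends with", " or ")]

def ghdOps : List String := ghdTable.map (·.1)

def generate_human_description_alt (rules : List (List (String × String))) : String :=
  if rules = [] then "No rules defined" else
  let buckets := rules.foldl
    (fun d r =>
      let op := pvKey r "operator"
      if ghdOps.contains op then d.modify op [] (· ++ [pvKey r "keyword"]) else d)
    PySem.Dict.empty
  let parts := ghdTable.foldl
    (fun parts t =>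
      let kws := buckets.getD t.1 []
      if kws ≠ [] then parts ++ [PySem.Str.join "" [t.2.1, " ", PySem.Str.join t.2.2 kws]] else parts)
    []
  PySem.Str.join ", " parts

-- ===== PRECONDITION & SPEC =====
-- Pre_ excludes exactly the inputs on which Python A raises KeyError: a rule missing the
-- 'operator' key, or missing 'keyword' while its operator is one of the six handled ones.
def Pre_generate_human_description (rules : List (List (String × String))) : Prop :=
  (rules.all (fun r =>
    ((PySem.Dict.mk r).get? "operator").isSome &&
    (!(["NOT_START_WITH", "START_WITH", "OR", "AND", "NOT", "END_WITH"].contains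
        (((PySem.Dict.mk r).get? "operator").getD ""))
     || ((PySem.Dict.mk r).get? "keyword").isSome))) = true
instance (rules : List (List (String × String))) : Decidable (Pre_generate_human_description rules) := by unfold Pre_generate_human_description; infer_instance
def pvWitness_generate_human_description : (List (List (String × String))) :=
  [[("operator", "OR"), ("keyword", "grocery")], [("operator", "NOT"), ("keyword", "gift")]]
def Spec_generate_human_description (rules : List (List (String × String))) (out : String) : Prop := out = generate_human_description_alt rules
instance (rules : List (List (String × String))) (out : String) : Decidable (Spec_generate_human_description rules out) := by unfold Spec_generate_human_description; infer_instance

-- ===== CLAIM (what is proved, stated in full; the proofs are below) =====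
def Claim_equal_generate_human_description : Prop := ∀ (rules : List (List (String × String))), Dom_generate_human_description rules → Pre_generate_human_description rules → Spec_generate_human_description rules (generate_human_description rules)

-- ===== LEMMAS AND PROOFS =====

-- B's bucket for a recognized operator is exactly A's filtered keyword list.
theorem ghd_bucket_go (rules : List (List (String × String))) (op : String)
    (hop : ghdOps.contains op = true) (d : PySem.Dict String (List String)) :
    (rules.foldl (fun d r =>
        let o := pvKey r "operator"
        if ghdOps.contains o then d.modify o [] (· ++ [pvKey r "keyword"]) else d) d).getD op []
      = d.getD op [] ++ (rules.filter (fun r => pvKey r "operator" == op)).map (fun r => pvKey r "keyword") := by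
  induction rules generalizing d with
  | nil => simp
  | cons r rs ih =>
    simp only [List.foldl_cons, List.filter_cons]
    by_cases hc : ghdOps.contains (pvKey r "operator") = true
    · rw [if_pos hc, ih]
      by_cases he : op = pvKey r "operator"
      · simp [he]
      · have he' : ¬ pvKey r "operator" = op := fun h => he (Eq.symm h)
        simp [PySem.Dict.getD_modify, he, he']
    · have hne : (pvKey r "operator" == op) = false := by
        rcases Bool.eq_false_iff.mp (Bool.not_eq_true _ ▸ hc) with _
        exact beq_eq_false_iff_ne.mpr (fun he => hc (he ▸ hop))
      rw [if_neg hc, ih]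
      simp [hne]

theorem ghd_bucket_eq (rules : List (List (String × String))) (op : String)
    (hop : ghdOps.contains op = true) :
    (rules.foldl (fun d r =>
        let o := pvKey r "operator"
        if ghdOps.contains o then d.modify o [] (· ++ [pvKey r "keyword"]) else d)
        PySem.Dict.empty).getD op []
      = (rules.filter (fun r => pvKey r "operator" == op)).map (fun r => pvKey r "keyword") := by
  rw [ghd_bucket_go rules op hop]
  simp

-- ===== VERDICT (by name: the statement is the Claim_ definition above) =====
theorem generate_human_description_spec : Claim_equal_generate_human_description := by
  intro rules _ _
  unfold Spec_generate_human_description generate_human_description generate_human_description_alt ghdTable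
  by_cases h : rules = []
  · simp [h]
  · simp only [h, List.foldl]
    rw [ghd_bucket_eq _ _ (by decide), ghd_bucket_eq _ _ (by decide),
        ghd_bucket_eq _ _ (by decide), ghd_bucket_eq _ _ (by decide),
        ghd_bucket_eq _ _ (by decide), ghd_bucket_eq _ _ (by decide)]
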